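-- pv_equiv track=rewrite | github.com/mooyee0929/minesweeper | agent.py | at_least_clauses
-- ===== SOURCE A (Python) =====
-- import itertools
--
-- def at_least_clauses(row, col, k, unrevealed_neighbors):
--     """ Creates propositional logic in CNF form saying that at least k cells out of the unrevealed neighbors are mines.
--
--     Parameters
--     ----------
--     row : int
--         The cell's row (counting from 0)
--     column : int
--         The cell's column (counting from 0)
--     k: int
--         The number of neighbors of the cell containing a mine.
--     unrevealed_neighbors: list[(int, int)]
--         For the given cell, the list of neighbors that are still unrevealed.
--
--     Returns
--     ---------
--     result : [str]
--         The propositional logic clause.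
--     """
--
--     # every group of (num unrevealed) - k + 1 contains at least one mine
--     combos = itertools.combinations(unrevealed_neighbors, len(unrevealed_neighbors) - k + 1)
--     res = []
--     for combo in combos:
--         combo = [f"B_{r}_{c}" for r,c in combo]
--         s = " || ".join(combo)
--         res.append(s)
--     return res
-- ===== SOURCE B (Python) =====
-- def at_least_clauses(row, col, k, unrevealed_neighbors):
--     # Backtracking over a start index instead of itertools.combinations:
--     # enumerate every size-r subset of the neighbor list in increasing-index
--     # (lexicographic) order, formatting each as a clause when complete.
--     r = len(unrevealed_neighbors) - k + 1
--     res = []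
--
--     def go(start, chosen):
--         if len(chosen) == r:
--             res.append(" || ".join("B_%d_%d" % (a, b) for a, b in chosen))
--             return
--         for i in range(start, len(unrevealed_neighbors)):
--             chosen.append(unrevealed_neighbors[i])
--             go(i + 1, chosen)
--             chosen.pop()
--
--     go(0, [])
--     return res
-- ===== Notes on version B (the rewrite author's own statement) =====
-- stated objective: alternative
-- what changed: Replaces the itertools.combinations library call with an explicit recursive backtracking enumeration over a start index that builds each size-r subset and formats it when complete.
import Mathlib
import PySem

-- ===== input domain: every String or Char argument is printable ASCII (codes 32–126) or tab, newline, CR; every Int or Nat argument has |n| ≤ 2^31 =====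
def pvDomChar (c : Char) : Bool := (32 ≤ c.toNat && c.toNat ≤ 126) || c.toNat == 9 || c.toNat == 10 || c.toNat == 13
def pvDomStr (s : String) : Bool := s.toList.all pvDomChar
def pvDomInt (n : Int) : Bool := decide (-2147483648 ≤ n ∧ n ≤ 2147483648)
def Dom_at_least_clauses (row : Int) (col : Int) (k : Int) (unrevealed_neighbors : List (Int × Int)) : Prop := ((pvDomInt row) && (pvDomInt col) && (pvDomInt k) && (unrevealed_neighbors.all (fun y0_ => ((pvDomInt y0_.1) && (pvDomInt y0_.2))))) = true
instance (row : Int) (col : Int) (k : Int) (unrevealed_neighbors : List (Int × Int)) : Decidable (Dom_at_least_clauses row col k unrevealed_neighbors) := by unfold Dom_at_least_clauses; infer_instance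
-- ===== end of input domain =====

-- ===== PORT A =====
-- B replaces the itertools.combinations call with explicit index-order backtracking; alternative decomposition, same cost.
-- itertools.combinations(xs, r) for r >= 0, in itertools' lexicographic index order
def pvCombN {α : Type} : Nat → List α → List (List α)
  | 0, _ => [[]]
  | _ + 1, [] => []
  | r + 1, x :: t => (pvCombN r t).map (fun c => x :: c) ++ pvCombN (r + 1) t

def at_least_clauses (row : Int) (col : Int) (k : Int) (unrevealed_neighbors : List (Int × Int)) : List String :=
  let r : Int := (unrevealed_neighbors.length : Int) - k + 1
  let combos : List (List (Int × Int)) := if r < 0 then [] else pvCombN r.toNat unrevealed_neighbors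
  combos.foldl (fun res combo =>
    res ++ [PySem.Str.join " || " (combo.map (fun p => "B_" ++ PySem.Int.toStr p.1 ++ "_" ++ PySem.Int.toStr p.2))]) []

-- ===== PORT B =====
-- the clause formatted from a chosen subset
def pvClause (chosen : List (Int × Int)) : String :=
  PySem.Str.join " || " (chosen.map (fun p => "B_" ++ PySem.Int.toStr p.1 ++ "_" ++ PySem.Int.toStr p.2))

-- go(start, chosen): the 'for i in range(start, n)' loop fused into the recursion,
-- with rest = unrevealed_neighbors[start:]
def pvGoAlt (r : Int) : List (Int × Int) → List (Int × Int) → List String → List String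
  | rest, chosen, res =>
    if (chosen.length : Int) = r then res ++ [pvClause chosen]
    else match rest with
      | [] => res
      | x :: t => pvGoAlt r t chosen (pvGoAlt r t (chosen ++ [x]) res)

def at_least_clauses_alt (row : Int) (col : Int) (k : Int) (unrevealed_neighbors : List (Int × Int)) : List String :=
  let r : Int := (unrevealed_neighbors.length : Int) - k + 1
  pvGoAlt r unrevealed_neighbors [] []

-- ===== PRECONDITION & SPEC =====
-- Pre_ excludes exactly k > len(unrevealed_neighbors) + 1, where the subset size is negative and
-- Python's itertools.combinations raises ValueError, so A returns no value there.
def Pre_at_least_clauses (row : Int) (col : Int) (k : Int) (unrevealed_neighbors : List (Int × Int)) : Prop :=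
  k ≤ (unrevealed_neighbors.length : Int) + 1
instance (row : Int) (col : Int) (k : Int) (unrevealed_neighbors : List (Int × Int)) : Decidable (Pre_at_least_clauses row col k unrevealed_neighbors) := by unfold Pre_at_least_clauses; infer_instance

def pvWitness_at_least_clauses : Int × Int × Int × (List (Int × Int)) := (0, 0, 1, [(0, 0), (1, 2)])

def Spec_at_least_clauses (row : Int) (col : Int) (k : Int) (unrevealed_neighbors : List (Int × Int)) (out : List String) : Prop := out = at_least_clauses_alt row col k unrevealed_neighbors
instance (row : Int) (col : Int) (k : Int) (unrevealed_neighbors : List (Int × Int)) (out : List String) : Decidable (Spec_at_least_clauses row col k unrevealed_neighbors out) := by unfold Spec_at_least_clauses; infer_instance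

-- ===== CLAIM (what is proved, stated in full; the proofs are below) =====
def Claim_equal_at_least_clauses : Prop := ∀ (row : Int) (col : Int) (k : Int) (unrevealed_neighbors : List (Int × Int)), Dom_at_least_clauses row col k unrevealed_neighbors → Pre_at_least_clauses row col k unrevealed_neighbors → Spec_at_least_clauses row col k unrevealed_neighbors (at_least_clauses row col k unrevealed_neighbors)

-- ===== LEMMAS AND PROOFS =====
-- combinations over an Int size: [] for negative size
def pvCombs {α : Type} (r : Int) (xs : List α) : List (List α) :=
  if r < 0 then [] else pvCombN r.toNat xs

theorem pvCombN_nil {α : Type} (r : Nat) (h : r ≠ 0) : pvCombN r ([] : List α) = [] := by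
  cases r with
  | zero => exact absurd rfl h
  | succ n => rfl

theorem pvCombs_nil {α : Type} (d : Int) (hd : d ≠ 0) : pvCombs d ([] : List α) = [] := by
  unfold pvCombs
  split
  · rfl
  · exact pvCombN_nil _ (by omega)

theorem pvCombs_cons {α : Type} (d : Int) (hd : d ≠ 0) (x : α) (t : List α) :
    pvCombs d (x :: t) = (pvCombs (d - 1) t).map (fun c => x :: c) ++ pvCombs d t := by
  unfold pvCombs
  by_cases hneg : d < 0
  · simp [hneg, show d - 1 < 0 by omega]
  · have h1 : ¬ (d - 1 < 0) := by omega
    have h0 : d.toNat = (d - 1).toNat + 1 := by omega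
    simp only [if_neg hneg, if_neg h1]
    rw [h0]
    rfl

theorem pvGo_eq (r : Int) (rest : List (Int × Int)) : ∀ (chosen : List (Int × Int)) (res : List String),
    pvGoAlt r rest chosen res
      = res ++ (pvCombs (r - chosen.length) rest).map (fun c => pvClause (chosen ++ c)) := by
  induction rest with
  | nil =>
    intro chosen res
    rw [pvGoAlt]
    by_cases h : (chosen.length : Int) = r
    · simp [h, pvCombs, pvCombN]
    · simp [h, pvCombs_nil (r - (chosen.length : Int)) (by omega)]
  | cons x t ih =>
    intro chosen res
    rw [pvGoAlt]
    by_cases h : (chosen.length : Int) = r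
    · simp [h, pvCombs, pvCombN]
    · simp only [if_neg h]
      rw [ih, ih]
      rw [pvCombs_cons (r - (chosen.length : Int)) (by omega) x t]
      have hlen : r - ((chosen ++ [x]).length : Int) = r - (chosen.length : Int) - 1 := by
        simp; omega
      rw [hlen]
      simp [List.append_assoc, Function.comp]

theorem pvFoldl_app (g : List (Int × Int) → String) :
    ∀ (l : List (List (Int × Int))) (init : List String),
      l.foldl (fun res c => res ++ [g c]) init = init ++ l.map g := by
  intro l
  induction l with
  | nil => intro init; simp
  | cons c t ih => intro init; simp [List.foldl, ih]

theorem at_least_clauses_spec : Claim_equal_at_least_clauses := by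
  intro row col k ns _ _
  unfold Spec_at_least_clauses at_least_clauses at_least_clauses_alt
  rw [pvGo_eq]
  have hc : (if ((ns.length : Int) - k + 1) < 0 then ([] : List (List (Int × Int)))
      else pvCombN ((ns.length : Int) - k + 1).toNat ns) = pvCombs ((ns.length : Int) - k + 1) ns := rfl
  simp only [hc, List.length_nil, Int.natCast_zero, sub_zero, List.nil_append]
  exact pvFoldl_app _ _ []
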